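-- pv_equiv track=rewrite | github.com/Qata/hypothesis | hypervisor.py | parse_todo_capabilities
-- ===== SOURCE A (Python) =====
-- def parse_todo_capabilities(plan_text: str) -> list:
--     """Parse numbered TODO capabilities from planner output"""
--     capabilities = []
--     lines = plan_text.strip().split('\n')
--     current_capability = ""
--
--     for line in lines:
--         # Check if line starts with a number followed by period or parenthesis
--         if line.strip() and (line.strip()[0].isdigit() and ('.' in line[:5] or ')' in line[:5])):
--             if current_capability:
--                 capabilities.append(current_capability.strip())
--             current_capability = line
--         elif current_capability:
--             current_capability += "\n" + line
--
--     if current_capability: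
--         capabilities.append(current_capability.strip())
--
--     return capabilities
-- ===== SOURCE B (Python) =====
-- def _is_header(line):
--     s = line.strip()
--     return bool(s) and s[0].isdigit() and ('.' in line[:5] or ')' in line[:5])
--
--
-- def _segments(lines):
--     # lines starts with a header line (or is empty): emit one segment, recurse on the rest
--     if not lines:
--         return []
--     k = 1
--     while k < len(lines) and not _is_header(lines[k]):
--         k += 1
--     return ['\n'.join(lines[:k]).strip()] + _segments(lines[k:])
--
--
-- def parse_todo_capabilities(plan_text: str) -> list:
--     """Parse numbered TODO capabilities from planner output"""
--     lines = plan_text.strip().split('\n')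
--     i = 0
--     while i < len(lines) and not _is_header(lines[i]):
--         i += 1
--     return _segments(lines[i:])
-- ===== Notes on version B (the rewrite author's own statement) =====
-- stated objective: alternative
-- what changed: Replaced A's single pass with a mutable running accumulator (current_capability grown line by line and flushed at the next header) by a two-phase decomposition: drop lines before the first header, then recursively split the list at header boundaries and join-and-strip each segment.
import Mathlib
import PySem

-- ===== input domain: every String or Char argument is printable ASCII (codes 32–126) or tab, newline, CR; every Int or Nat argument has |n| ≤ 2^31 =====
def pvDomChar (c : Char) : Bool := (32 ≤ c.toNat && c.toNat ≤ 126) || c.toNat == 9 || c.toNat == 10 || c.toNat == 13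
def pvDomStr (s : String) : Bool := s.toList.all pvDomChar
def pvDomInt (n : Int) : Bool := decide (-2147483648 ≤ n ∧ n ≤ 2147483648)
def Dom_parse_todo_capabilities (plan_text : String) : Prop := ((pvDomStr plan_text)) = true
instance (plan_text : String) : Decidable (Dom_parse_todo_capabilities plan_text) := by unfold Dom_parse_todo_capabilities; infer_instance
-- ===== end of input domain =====

-- B re-implements A's running-accumulator scan as a drop-to-first-header pass plus a
-- recursive segmentation (span to the next header, join, strip); objective: alternative
-- decomposition, same results on every input (A is total).

-- the header predicate both Pythons test verbatim:
-- line.strip() and line.strip()[0].isdigit() and ('.' in line[:5] or ')' in line[:5])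
def pvHeader (line : String) : Bool :=
  let s := PySem.Str.strip line
  decide (s ≠ "") &&
    ((PySem.Str.pyGet? s 0).elim false PySem.Chars.isdigit) &&
    (PySem.Str.isIn "." (PySem.Str.slice line none (some 5)) ||
     PySem.Str.isIn ")" (PySem.Str.slice line none (some 5)))

-- ===== PORT A =====
-- single pass with the running accumulator (capabilities, current_capability); "" plays None
def parse_todo_capabilities (plan_text : String) : List String :=
  let lines := (PySem.Str.split? (PySem.Str.strip plan_text) "\n").getD []
  let st := lines.foldl (fun (st : List String × String) line =>
    if pvHeader line then
      (if st.2 ≠ "" then st.1 ++ [PySem.Str.strip st.2] else st.1, line)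
    else if st.2 ≠ "" then (st.1, st.2 ++ "\n" ++ line)
    else st) ([], "")
  if st.2 ≠ "" then st.1 ++ [PySem.Str.strip st.2] else st.1

-- ===== PORT B =====
-- _segments: lines begins with a header (or is empty); span to the next header, join, strip, recurse
def pvSegments : List String → List String
  | [] => []
  | h :: t =>
    PySem.Str.strip (PySem.Str.join "\n" (h :: t.takeWhile (fun l => !pvHeader l))) ::
      pvSegments (t.dropWhile (fun l => !pvHeader l))
termination_by ls => ls.length
decreasing_by
  simpa using Nat.lt_succ_of_le (List.length_dropWhile_le _ t)

def parse_todo_capabilities_alt (plan_text : String) : List String :=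
  let lines := (PySem.Str.split? (PySem.Str.strip plan_text) "\n").getD []
  pvSegments (lines.dropWhile (fun l => !pvHeader l))

-- ===== PRECONDITION & SPEC =====
def Spec_parse_todo_capabilities (plan_text : String) (out : List String) : Prop := out = parse_todo_capabilities_alt plan_text
instance (plan_text : String) (out : List String) : Decidable (Spec_parse_todo_capabilities plan_text out) := by unfold Spec_parse_todo_capabilities; infer_instance

-- ===== CLAIM (what is proved, stated in full; the proofs are below) =====
def Claim_equal_parse_todo_capabilities : Prop := ∀ (plan_text : String), Dom_parse_todo_capabilities plan_text → Spec_parse_todo_capabilities plan_text (parse_todo_capabilities plan_text)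

-- ===== LEMMAS AND PROOFS =====

-- abbreviations for the proof (A's loop step and finalisation)
def pvStep (st : List String × String) (line : String) : List String × String :=
  if pvHeader line then
    (if st.2 ≠ "" then st.1 ++ [PySem.Str.strip st.2] else st.1, line)
  else if st.2 ≠ "" then (st.1, st.2 ++ "\n" ++ line)
  else st

def pvFin (st : List String × String) : List String :=
  if st.2 ≠ "" then st.1 ++ [PySem.Str.strip st.2] else st.1

lemma pvStep_caps (caps : List String) (cur line : String) :
    pvStep (caps, cur) line =
      (caps ++ (pvStep ([], cur) line).1, (pvStep ([], cur) line).2) := by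
  unfold pvStep
  by_cases h1 : pvHeader line <;> by_cases h2 : cur ≠ "" <;> simp [h1, h2]

lemma pvFoldl_caps (ls : List String) (caps : List String) (cur : String) :
    ls.foldl pvStep (caps, cur) =
      (caps ++ (ls.foldl pvStep ([], cur)).1, (ls.foldl pvStep ([], cur)).2) := by
  induction ls generalizing caps cur with
  | nil => simp
  | cons l t ih =>
    simp only [List.foldl_cons]
    rw [pvStep_caps caps cur l, ih, ih (pvStep ([], cur) l).1]
    simp

lemma pvAppend_ne_empty (a b : String) : a ++ "\n" ++ b ≠ "" := by
  intro h
  have := congrArg String.toList h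
  simp at this

lemma pvHeader_ne_empty {l : String} (h : pvHeader l = true) : l ≠ "" := by
  rintro rfl
  exact absurd h (by decide)

lemma pvFin_caps (caps : List String) (st : List String × String) :
    pvFin (caps ++ st.1, st.2) = caps ++ pvFin st := by
  unfold pvFin
  by_cases h : st.2 ≠ "" <;> simp [h]

-- '\n'.join(h :: body) is A's repeated  cur = cur + "\n" + line  accumulation
lemma pvJoinAcc (body : List String) (h : String) :
    body.foldl (fun c l => c ++ "\n" ++ l) h = PySem.Str.join "\n" (h :: body) := by
  induction body generalizing h with
  | nil =>
    apply String.toList_inj.mp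
    simp [PySem.Str.toList_join, PySem.Chars.join_singleton]
  | cons b bs ih =>
    simp only [List.foldl_cons]
    rw [ih (h ++ "\n" ++ b)]
    apply String.toList_inj.mp
    cases bs with
    | nil =>
      simp [PySem.Str.toList_join, PySem.Chars.join_singleton, PySem.Chars.join_cons_cons]
    | cons c cs =>
      simp [PySem.Str.toList_join, PySem.Chars.join_cons_cons]

-- A's loop from a live accumulator cur produces: the segment cur grows into, then the rest
lemma pvLoop_live (ls : List String) (cur : String) (hcur : cur ≠ "") :
    pvFin (ls.foldl pvStep ([], cur)) =
      PySem.Str.strip ((ls.takeWhile (fun l => !pvHeader l)).foldl (fun c l => c ++ "\n" ++ l) cur) ::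
        pvSegments (ls.dropWhile (fun l => !pvHeader l)) := by
  induction ls generalizing cur with
  | nil => simp [pvFin, hcur, pvSegments]
  | cons l t ih =>
    by_cases hl : pvHeader l = true
    · have hlne := pvHeader_ne_empty hl
      have h1 : (l :: t).foldl pvStep ([], cur) = t.foldl pvStep ([PySem.Str.strip cur], l) := by
        simp [pvStep, hl, hcur]
      rw [h1, pvFoldl_caps, show ([PySem.Str.strip cur] : List String) ++
        (t.foldl pvStep ([], l)).1 = [PySem.Str.strip cur] ++ (t.foldl pvStep ([], l)).1 from rfl,
        pvFin_caps [PySem.Str.strip cur] (t.foldl pvStep ([], l)), ih l hlne]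
      simp [hl, pvSegments, pvJoinAcc]
    · have hl' : pvHeader l = false := by simpa using hl
      have h1 : (l :: t).foldl pvStep ([], cur) = t.foldl pvStep ([], cur ++ "\n" ++ l) := by
        simp [pvStep, hl', hcur]
      rw [h1, ih (cur ++ "\n" ++ l) (pvAppend_ne_empty cur l)]
      simp [hl']

-- A's loop from the empty accumulator = B's drop-then-segment
lemma pvLoop_idle (ls : List String) :
    pvFin (ls.foldl pvStep ([], "")) = pvSegments (ls.dropWhile (fun l => !pvHeader l)) := by
  induction ls with
  | nil => simp [pvFin, pvSegments]
  | cons l t ih =>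
    by_cases hl : pvHeader l = true
    · have hlne := pvHeader_ne_empty hl
      have h1 : (l :: t).foldl pvStep ([], "") = t.foldl pvStep ([], l) := by
        simp [pvStep, hl]
      rw [h1, pvLoop_live t l hlne]
      simp [hl, pvSegments, pvJoinAcc]
    · have hl' : pvHeader l = false := by simpa using hl
      have h1 : (l :: t).foldl pvStep ([], "") = t.foldl pvStep ([], "") := by
        simp [pvStep, hl']
      rw [h1, ih]
      simp [hl']

-- ===== VERDICT (by name: the statement is the Claim_ definition above) =====
theorem parse_todo_capabilities_spec : Claim_equal_parse_todo_capabilities := by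
  intro plan_text _
  show parse_todo_capabilities plan_text = parse_todo_capabilities_alt plan_text
  unfold parse_todo_capabilities parse_todo_capabilities_alt
  exact pvLoop_idle _
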